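-- pv_equiv track=rewrite | github.com/Juju85194/projet-python-1A | delivery_network/graph.py | get_path_to_lca
-- ===== SOURCE A (Python) =====
-- def get_path_to_lca(node1, node2, parent_dict):
--     """
--     Returns the path from node1 to the least common ancestor (LCA) of node1 and node2, and the path from the LCA to node2.
--     """
--     path1 = [node1]
--     path2 = [node2]
--     while node1 != node2:
--         if parent_dict[node1][1] < parent_dict[node2][1]:
--             node2 = parent_dict[node2][0]
--             path2.append(node2)
--         else:
--             node1 = parent_dict[node1][0]
--             path1.append(node1)
--     lca = node1
--     path = path1 + path2[::-1][1:]  # combine both paths and remove LCA from one of them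
--     return path
-- ===== SOURCE B (Python) =====
-- def get_path_to_lca(node1, node2, parent_dict):
--     """
--     Same result as A: path node1 -> LCA -> node2.
--     Different decomposition: climb node1 all the way to the root once, recording
--     each ancestor's position in a table; then climb node2 until the first node
--     already in that table (the LCA), with no depth comparisons at all.
--     """
--     if node1 == node2:
--         return [node1]
--     path1 = [node1]
--     pos = {node1: 0}
--     n = node1
--     while parent_dict[n][0] != n:
--         n = parent_dict[n][0]
--         pos[n] = len(path1)
--         path1.append(n)
--     path2 = []
--     m = node2
--     while m not in pos:
--         path2.append(m)
--         m = parent_dict[m][0]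
--     return path1[:pos[m] + 1] + path2[::-1]
-- ===== Notes on version B (the rewrite author's own statement) =====
-- stated objective: alternative
-- what changed: Replaces A's interleaved depth-comparison climb of both nodes by an index-then-scan scheme: B climbs node1 once to the root recording each ancestor's index in a table, then climbs node2 to the first node present in that table (the LCA) without ever comparing depths.
-- outside the precondition, e.g. on get_path_to_lca(1, 2, {1: (0, 1), 2: (0, 1), 0: (9, 0)}): A returns [1, 0, 2], B raises KeyError; on get_path_to_lca(1, 2, {1: (3, 1), 2: (3, 1), 3: (3, 0), 8: (8, 0)}): A returns [1, 3, 2], B returns [1, 3, 2]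
import Mathlib
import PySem

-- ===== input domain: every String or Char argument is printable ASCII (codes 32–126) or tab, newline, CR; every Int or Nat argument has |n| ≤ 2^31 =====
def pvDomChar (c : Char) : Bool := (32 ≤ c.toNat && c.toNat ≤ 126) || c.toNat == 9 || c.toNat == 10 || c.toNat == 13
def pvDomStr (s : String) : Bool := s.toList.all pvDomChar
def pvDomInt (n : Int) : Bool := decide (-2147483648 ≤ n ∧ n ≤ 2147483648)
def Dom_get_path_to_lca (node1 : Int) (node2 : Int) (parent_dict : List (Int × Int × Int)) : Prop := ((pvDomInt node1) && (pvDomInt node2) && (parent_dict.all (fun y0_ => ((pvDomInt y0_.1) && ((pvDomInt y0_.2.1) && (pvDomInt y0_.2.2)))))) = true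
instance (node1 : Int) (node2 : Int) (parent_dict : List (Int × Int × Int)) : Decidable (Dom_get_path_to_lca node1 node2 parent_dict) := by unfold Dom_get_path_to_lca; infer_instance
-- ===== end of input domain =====

-- B replaces A's interleaved depth-comparison climb by "index node1's chain, then scan node2's chain
-- for the first indexed node"; same return value on Pre_ (alternative decomposition, not claimed faster).


-- ===== PORT A =====
-- parent_dict[k]: dict → association list (insertion order), lookup = first match; none = KeyError (outside Pre_).
def pvLook : List (Int × Int × Int) → Int → Option (Int × Int)
  | [], _ => none
  | e :: rest, x => if e.1 = x then some e.2 else pvLook rest x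

-- parent_dict[k][0] and parent_dict[k][1]; default (0,0) only reached where Python raises KeyError (outside Pre_)
def pvPar (pd : List (Int × Int × Int)) (n : Int) : Int := ((pvLook pd n).getD (0, 0)).1
def pvDep (pd : List (Int × Int × Int)) (n : Int) : Int := ((pvLook pd n).getD (0, 0)).2

-- minimum depth occurring in the table (0 if empty); fuel bookkeeping only
def pvDmin (pd : List (Int × Int × Int)) : Int := pd.foldr (fun e m => min e.2.2 m) 0

-- under Pre_ each loop iteration strictly decreases dep n1 + dep n2, which stays ≥ 2*dmin
def pvFuelA (pd : List (Int × Int × Int)) (n1 n2 : Int) : Nat :=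
  ((pvDep pd n1 + pvDep pd n2) - 2 * pvDmin pd).toNat + 1

-- A's while-loop; the 0-fuel combine is never reached under Pre_.
-- path1 + path2[::-1][1:]  =  path1 ++ path2.reverse.drop 1 (exact: [1:] is drop 1)
def pvLoopA (pd : List (Int × Int × Int)) : Nat → Int → Int → List Int → List Int → List Int
  | 0, _, _, path1, path2 => path1 ++ path2.reverse.drop 1
  | fuel+1, n1, n2, path1, path2 =>
    if n1 = n2 then path1 ++ path2.reverse.drop 1
    else if pvDep pd n1 < pvDep pd n2 then
      pvLoopA pd fuel n1 (pvPar pd n2) path1 (path2 ++ [pvPar pd n2])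
    else
      pvLoopA pd fuel (pvPar pd n1) n2 (path1 ++ [pvPar pd n1]) path2

def get_path_to_lca (node1 : Int) (node2 : Int) (parent_dict : List (Int × Int × Int)) : List Int :=
  pvLoopA parent_dict (pvFuelA parent_dict node1 node2) node1 node2 [node1] [node2]

-- ===== PORT B =====
-- B's pos is a Python dict node ↦ index; ported as a first-match association list
-- (exact here: on Pre_ the inserted keys — the distinct chain nodes — are fresh).
def pvFind : List (Int × Int) → Int → Option Int
  | [], _ => none
  | e :: rest, x => if e.1 = x then some e.2 else pvFind rest x

def pvFuelB (pd : List (Int × Int × Int)) (n : Int) : Nat := (pvDep pd n - pvDmin pd).toNat + 1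

-- B's first loop: climb node1 to the root, appending to path1 and recording indices in pos
def pvBuild (pd : List (Int × Int × Int)) : Nat → Int → List Int → List (Int × Int) → List Int × List (Int × Int)
  | 0, _, path1, pos => (path1, pos)
  | fuel+1, n, path1, pos =>
    if pvPar pd n ≠ n then
      pvBuild pd fuel (pvPar pd n) (path1 ++ [pvPar pd n]) (pos ++ [(pvPar pd n, (path1.length : Int))])
    else (path1, pos)

-- B's second loop: climb node2 until the current node is a recorded ancestor of node1
def pvClimb (pd : List (Int × Int × Int)) : Nat → Int → List (Int × Int) → List Int → Int × List Int
  | 0, m, _, path2 => (m, path2)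
  | fuel+1, m, pos, path2 =>
    if (pvFind pos m).isSome then (m, path2)
    else pvClimb pd fuel (pvPar pd m) pos (path2 ++ [m])

def get_path_to_lca_alt (node1 : Int) (node2 : Int) (parent_dict : List (Int × Int × Int)) : List Int :=
  if node1 = node2 then [node1]
  else
    let bp := pvBuild parent_dict (pvFuelB parent_dict node1) node1 [node1] [(node1, 0)]
    let cl := pvClimb parent_dict (pvFuelB parent_dict node2) node2 bp.2 []
    -- path1[:pos[m]+1] + path2[::-1]  (pos[m] ≥ 0, so [:i+1] is take (i+1))
    bp.1.take (((pvFind bp.2 cl.1).getD 0).toNat + 1) ++ cl.2.reverse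

-- ===== PRECONDITION & SPEC =====
def pvKeys (pd : List (Int × Int × Int)) : List Int := pd.map (·.1)

-- Pre_: either the trivial query node1 = node2 (A answers without touching the dict), or parent_dict is a
-- single-rooted tree table containing both nodes: every entry's parent is either the entry's own key (the
-- unique root) or a present key of strictly smaller depth.  This excludes dicts malformed or disconnected
-- ABOVE the LCA (A returns without ever looking there, but B climbs node1 all the way to the root and
-- would raise KeyError or not terminate), and dicts whose interleaved climb in A never meets (A loops or
-- raises there).  Nodup is the invariant of any list obtained from a Python dict; the proof tolerates
-- duplicates but real inputs never have them.
def Pre_get_path_to_lca (node1 : Int) (node2 : Int) (parent_dict : List (Int × Int × Int)) : Prop :=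
  node1 = node2 ∨
  ((pvKeys parent_dict).Nodup ∧ node1 ∈ pvKeys parent_dict ∧ node2 ∈ pvKeys parent_dict ∧
   (∀ e ∈ parent_dict, e.2.1 = e.1 ∨ (e.2.1 ∈ pvKeys parent_dict ∧ pvDep parent_dict e.2.1 < e.2.2)) ∧
   parent_dict.countP (fun e => e.2.1 == e.1) = 1)

instance (node1 : Int) (node2 : Int) (parent_dict : List (Int × Int × Int)) : Decidable (Pre_get_path_to_lca node1 node2 parent_dict) := by
  unfold Pre_get_path_to_lca; infer_instance

def pvWitness_get_path_to_lca : Int × Int × (List (Int × Int × Int)) :=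
  (1, 2, [(0, 0, 0), (1, 0, 1), (2, 0, 1)])

def Spec_get_path_to_lca (node1 : Int) (node2 : Int) (parent_dict : List (Int × Int × Int)) (out : List Int) : Prop := out = get_path_to_lca_alt node1 node2 parent_dict
instance (node1 : Int) (node2 : Int) (parent_dict : List (Int × Int × Int)) (out : List Int) : Decidable (Spec_get_path_to_lca node1 node2 parent_dict out) := by unfold Spec_get_path_to_lca; infer_instance

-- ===== CLAIM (what is proved, stated in full; the proofs are below) =====
def Claim_equal_get_path_to_lca : Prop := ∀ (node1 : Int) (node2 : Int) (parent_dict : List (Int × Int × Int)), Dom_get_path_to_lca node1 node2 parent_dict → Pre_get_path_to_lca node1 node2 parent_dict → Spec_get_path_to_lca node1 node2 parent_dict (get_path_to_lca node1 node2 parent_dict)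

-- ===== LEMMAS AND PROOFS =====

-- ---- lookup / depth-minimum basics ----
theorem pv_look_mem {pd : List (Int × Int × Int)} {k : Int} {v : Int × Int}
    (h : pvLook pd k = some v) : (k, v) ∈ pd := by
  induction pd with
  | nil => simp [pvLook] at h
  | cons e rest ih =>
    obtain ⟨k1, p, d⟩ := e
    by_cases he : k1 = k
    · subst he
      simp [pvLook] at h
      cases h
      exact List.mem_cons_self
    · simp only [pvLook, if_neg he] at h
      exact List.mem_cons_of_mem _ (ih h)

theorem pv_look_isSome {pd : List (Int × Int × Int)} {k : Int}
    (h : k ∈ pvKeys pd) : (pvLook pd k).isSome := by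
  induction pd with
  | nil => simp [pvKeys] at h
  | cons e rest ih =>
    by_cases he : e.1 = k
    · simp [pvLook, he]
    · simp only [pvKeys, List.map_cons, List.mem_cons] at h
      rcases h with h | h
      · exact absurd h.symm he
      · simpa [pvLook, he] using ih (by simpa [pvKeys] using h)

theorem pv_dmin_le {pd : List (Int × Int × Int)} {e : Int × Int × Int}
    (h : e ∈ pd) : pvDmin pd ≤ e.2.2 := by
  induction pd with
  | nil => simp at h
  | cons f rest ih =>
    rcases List.mem_cons.mp h with rfl | h
    · exact min_le_left _ _
    · exact le_trans (min_le_right _ _) (ih h)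

theorem pv_dmin_le_dep {pd : List (Int × Int × Int)} {k : Int}
    (h : k ∈ pvKeys pd) : pvDmin pd ≤ pvDep pd k := by
  obtain ⟨v, hv⟩ := Option.isSome_iff_exists.mp (pv_look_isSome h)
  have := pv_dmin_le (pv_look_mem hv)
  simpa [pvDep, hv] using this

-- the tree clause of Pre_, phrased on its own
def pvClause (pd : List (Int × Int × Int)) : Prop :=
  ∀ e ∈ pd, e.2.1 = e.1 ∨ (e.2.1 ∈ pvKeys pd ∧ pvDep pd e.2.1 < e.2.2)

theorem pv_step {pd : List (Int × Int × Int)} (H : pvClause pd) {k : Int} (hk : k ∈ pvKeys pd) :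
    pvPar pd k = k ∨ (pvPar pd k ∈ pvKeys pd ∧ pvDep pd (pvPar pd k) < pvDep pd k) := by
  obtain ⟨v, hv⟩ := Option.isSome_iff_exists.mp (pv_look_isSome hk)
  have := H (k, v) (pv_look_mem hv)
  simp only [pvPar, pvDep, hv, Option.getD_some]
  simpa using this

-- ---- the ancestor chain and the proof-level combinators ----
def tch (pd : List (Int × Int × Int)) : Nat → Int → List Int
  | 0, _ => []
  | f+1, n => if pvPar pd n ≠ n then pvPar pd n :: tch pd f (pvPar pd n) else []

def nmes (pd : List (Int × Int × Int)) (n : Int) : Nat := (pvDep pd n - pvDmin pd).toNat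

-- full chain strictly above n (root included, n excluded)
def Tc (pd : List (Int × Int × Int)) (n : Int) : List Int := tch pd (nmes pd n + 1) n

theorem pv_fuelB_eq (pd : List (Int × Int × Int)) (n : Int) : pvFuelB pd n = nmes pd n + 1 := rfl

def tagFrom : List Int → Nat → List (Int × Int)
  | [], _ => []
  | x :: xs, k => (x, (k : Int)) :: tagFrom xs (k+1)

def pvCore (pd : List (Int × Int × Int)) : Nat → Int → Int → List Int
  | 0, a, _ => [a]
  | f+1, a, b =>
    if a = b then [a]
    else if pvDep pd a < pvDep pd b then pvCore pd f a (pvPar pd b) ++ [b]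
    else a :: pvCore pd f (pvPar pd a) b

def pvMu (pd : List (Int × Int × Int)) (a b : Int) : Nat :=
  ((pvDep pd a + pvDep pd b) - 2 * pvDmin pd).toNat

theorem pv_fuelA_eq (pd : List (Int × Int × Int)) (a b : Int) : pvFuelA pd a b = pvMu pd a b + 1 := rfl

-- B's value written over the chain of a
def pvR (pd : List (Int × Int × Int)) (a b : Int) : List Int :=
  (a :: Tc pd a).take
      (((pvFind (tagFrom (a :: Tc pd a) 0)
          (pvClimb pd (pvFuelB pd b) b (tagFrom (a :: Tc pd a) 0) []).1).getD 0).toNat + 1)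
    ++ (pvClimb pd (pvFuelB pd b) b (tagFrom (a :: Tc pd a) 0) []).2.reverse


-- ---- one-step unfolding helpers (rfl) ----
theorem tch_succ (pd : List (Int × Int × Int)) (f : Nat) (n : Int) :
    tch pd (f+1) n = if pvPar pd n ≠ n then pvPar pd n :: tch pd f (pvPar pd n) else [] := rfl
theorem pvClimb_succ (pd : List (Int × Int × Int)) (f : Nat) (m : Int) (pos : List (Int × Int)) (p2 : List Int) :
    pvClimb pd (f+1) m pos p2 = if (pvFind pos m).isSome then (m, p2) else pvClimb pd f (pvPar pd m) pos (p2 ++ [m]) := rfl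
theorem pvBuild_succ (pd : List (Int × Int × Int)) (f : Nat) (n : Int) (p1 : List Int) (pos : List (Int × Int)) :
    pvBuild pd (f+1) n p1 pos = if pvPar pd n ≠ n then pvBuild pd f (pvPar pd n) (p1 ++ [pvPar pd n]) (pos ++ [(pvPar pd n, (p1.length : Int))]) else (p1, pos) := rfl
theorem pvLoopA_succ (pd : List (Int × Int × Int)) (f : Nat) (n1 n2 : Int) (p1 p2 : List Int) :
    pvLoopA pd (f+1) n1 n2 p1 p2 = if n1 = n2 then p1 ++ p2.reverse.drop 1
      else if pvDep pd n1 < pvDep pd n2 then pvLoopA pd f n1 (pvPar pd n2) p1 (p2 ++ [pvPar pd n2])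
      else pvLoopA pd f (pvPar pd n1) n2 (p1 ++ [pvPar pd n1]) p2 := rfl
theorem pvCore_succ (pd : List (Int × Int × Int)) (f : Nat) (a b : Int) :
    pvCore pd (f+1) a b = if a = b then [a]
      else if pvDep pd a < pvDep pd b then pvCore pd f a (pvPar pd b) ++ [b]
      else a :: pvCore pd f (pvPar pd a) b := rfl

-- ---- chain lemmas ----
theorem tch_succ_root {pd : List (Int × Int × Int)} {k : Int} (f : Nat) (hp : pvPar pd k = k) :
    tch pd (f+1) k = [] := by rw [tch_succ]; simp [hp]
theorem tch_succ_go {pd : List (Int × Int × Int)} {k : Int} (f : Nat) (hp : pvPar pd k ≠ k) :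
    tch pd (f+1) k = pvPar pd k :: tch pd f (pvPar pd k) := by rw [tch_succ]; simp [hp]

theorem tch_mem {pd : List (Int × Int × Int)} (H : pvClause pd) :
    ∀ (f : Nat) (k : Int), k ∈ pvKeys pd → ∀ x ∈ tch pd f k, x ∈ pvKeys pd ∧ pvDep pd x < pvDep pd k := by
  intro f
  induction f with
  | zero => intro k _ x hx; simp [tch] at hx
  | succ f ih =>
    intro k hk x hx
    by_cases hp : pvPar pd k = k
    · simp [tch_succ, hp] at hx
    · rcases pv_step H hk with h | ⟨hK, hD⟩
      · exact absurd h hp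
      · rw [tch_succ, if_pos hp] at hx
        rcases List.mem_cons.mp hx with rfl | hx
        · exact ⟨hK, hD⟩
        · obtain ⟨h1, h2⟩ := ih (pvPar pd k) hK x hx
          exact ⟨h1, lt_trans h2 hD⟩

theorem nmes_lt {pd : List (Int × Int × Int)} {a b : Int}
    (ha : a ∈ pvKeys pd) (hb : b ∈ pvKeys pd) (h : pvDep pd a < pvDep pd b) :
    nmes pd a < nmes pd b := by
  have h1 := pv_dmin_le_dep ha
  have h2 := pv_dmin_le_dep hb
  unfold nmes
  omega

theorem tch_stab {pd : List (Int × Int × Int)} (H : pvClause pd) :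
    ∀ (f : Nat) (k : Int), k ∈ pvKeys pd → nmes pd k < f → tch pd (f+1) k = tch pd f k := by
  intro f
  induction f with
  | zero => intro k _ h; exact absurd h (Nat.not_lt_zero _)
  | succ f ih =>
    intro k hk h
    by_cases hp : pvPar pd k = k
    · rw [tch_succ_root (f+1) hp, tch_succ_root f hp]
    · rcases pv_step H hk with h' | ⟨hK, hD⟩
      · exact absurd h' hp
      · have hn := nmes_lt hK hk hD
        rw [tch_succ_go (f+1) hp, tch_succ_go f hp, ih (pvPar pd k) hK (by omega)]

theorem tch_eq_Tc {pd : List (Int × Int × Int)} (H : pvClause pd) :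
    ∀ (f : Nat) (k : Int), k ∈ pvKeys pd → nmes pd k < f → tch pd f k = Tc pd k := by
  intro f
  induction f with
  | zero => intro k _ h; exact absurd h (Nat.not_lt_zero _)
  | succ f ih =>
    intro k hk h
    rcases Nat.lt_succ_iff_lt_or_eq.mp h with h' | h'
    · rw [tch_stab H f k hk h', ih k hk h']
    · rw [Tc, ← h']

theorem Tc_cons {pd : List (Int × Int × Int)} (H : pvClause pd) {k : Int}
    (hk : k ∈ pvKeys pd) (hp : pvPar pd k ≠ k) : Tc pd k = pvPar pd k :: Tc pd (pvPar pd k) := by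
  rcases pv_step H hk with h | ⟨hK, hD⟩
  · exact absurd h hp
  · have hn := nmes_lt hK hk hD
    rw [Tc, tch_succ, if_pos hp, tch_eq_Tc H (nmes pd k) (pvPar pd k) hK hn]

theorem Tc_root {pd : List (Int × Int × Int)} {k : Int} (hp : pvPar pd k = k) : Tc pd k = [] := by
  rw [Tc, tch_succ, if_neg (by simpa using hp)]

theorem Tc_last {pd : List (Int × Int × Int)} (H : pvClause pd) :
    ∀ (N : Nat) (k : Int), k ∈ pvKeys pd → nmes pd k ≤ N →
      ∃ r, r ∈ k :: Tc pd k ∧ pvPar pd r = r ∧ r ∈ pvKeys pd := by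
  intro N
  induction N with
  | zero =>
    intro k hk hle
    by_cases hp : pvPar pd k = k
    · exact ⟨k, List.mem_cons_self, hp, hk⟩
    · rcases pv_step H hk with h | ⟨hK, hD⟩
      · exact absurd h hp
      · have := nmes_lt hK hk hD; omega
  | succ N ih =>
    intro k hk hle
    by_cases hp : pvPar pd k = k
    · exact ⟨k, List.mem_cons_self, hp, hk⟩
    · rcases pv_step H hk with h | ⟨hK, hD⟩
      · exact absurd h hp
      · have hn := nmes_lt hK hk hD
        obtain ⟨r, hr, hpr, hrk⟩ := ih (pvPar pd k) hK (by omega)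
        exact ⟨r, by rw [Tc_cons H hk hp]; exact List.mem_cons_of_mem _ hr, hpr, hrk⟩

theorem pv_uniq {pd : List (Int × Int × Int)}
    (Hc : pd.countP (fun e => e.2.1 == e.1) = 1) {r r' : Int}
    (hr : r ∈ pvKeys pd) (hr' : r' ∈ pvKeys pd)
    (pr : pvPar pd r = r) (pr' : pvPar pd r' = r') : r = r' := by
  by_contra hne
  obtain ⟨v, hv⟩ := Option.isSome_iff_exists.mp (pv_look_isSome hr)
  obtain ⟨v', hv'⟩ := Option.isSome_iff_exists.mp (pv_look_isSome hr')
  have hm : (r, v) ∈ pd := pv_look_mem hv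
  have hm' : (r', v') ∈ pd := pv_look_mem hv'
  have hp : v.1 = r := by simpa [pvPar, hv] using pr
  have hp' : v'.1 = r' := by simpa [pvPar, hv'] using pr'
  have h1 : ((r, v).2.1 == (r, v).1) = true := by simp [hp]
  have h1' : (((r', v').2.1 == (r', v').1)) = true := by simp [hp']
  rw [List.countP_eq_length_filter] at Hc
  have hin : (r, v) ∈ pd.filter (fun e => e.2.1 == e.1) := List.mem_filter.mpr ⟨hm, h1⟩
  have hin' : (r', v') ∈ pd.filter (fun e => e.2.1 == e.1) := List.mem_filter.mpr ⟨hm', h1'⟩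
  obtain ⟨s, t, hst⟩ := List.append_of_mem hin
  rw [hst] at Hc hin'
  rcases List.mem_append.mp hin' with h2 | h2
  · have := List.length_pos_of_mem h2
    simp [List.length_append] at Hc
    omega
  · rcases List.mem_cons.mp h2 with h3 | h3
    · exact hne (congrArg Prod.fst h3).symm
    · have := List.length_pos_of_mem h3
      simp [List.length_append] at Hc
      omega

-- ---- pvBuild characterization ----
theorem pvBuild_eq (pd : List (Int × Int × Int)) :
    ∀ (f : Nat) (n : Int) (p1 : List Int) (pos : List (Int × Int)),
      pvBuild pd f n p1 pos = (p1 ++ tch pd f n, pos ++ tagFrom (tch pd f n) p1.length) := by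
  intro f
  induction f with
  | zero => intro n p1 pos; simp [pvBuild, tch, tagFrom]
  | succ f ih =>
    intro n p1 pos
    by_cases hp : pvPar pd n = n
    · rw [pvBuild_succ, if_neg (by simpa using hp), tch_succ, if_neg (by simpa using hp)]
      simp [tagFrom]
    · rw [pvBuild_succ, if_pos hp, tch_succ, if_pos hp, ih]
      simp [tagFrom, List.length_append, List.append_assoc]

theorem pvFind_tag : ∀ (l : List Int) (k : Nat) (x : Int),
    pvFind (tagFrom l k) x = if x ∈ l then some ((k + l.idxOf x : Nat) : Int) else none := by
  intro l
  induction l with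
  | nil => intro k x; simp [tagFrom, pvFind]
  | cons a l ih =>
    intro k x
    by_cases hax : a = x
    · subst hax
      simp [tagFrom, pvFind]
    · rw [show tagFrom (a :: l) k = (a, (k : Int)) :: tagFrom l (k+1) from rfl]
      rw [show pvFind ((a, (k : Int)) :: tagFrom l (k+1)) x
            = if a = x then some (k : Int) else pvFind (tagFrom l (k+1)) x from rfl]
      rw [if_neg hax, ih]
      by_cases hxl : x ∈ l
      · rw [if_pos hxl, if_pos (List.mem_cons_of_mem _ hxl)]
        have h1 : l.idxOf x + 1 = (a :: l).idxOf x := (List.idxOf_cons_ne l (by exact hax)).symm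
        congr 1
        have : k + 1 + l.idxOf x = k + (a :: l).idxOf x := by omega
        exact_mod_cast congrArg (fun n : Nat => (n : Int)) this
      · rw [if_neg hxl, if_neg (by simp [hxl, Ne.symm hax])]

-- ---- pvClimb lemmas ----
theorem pvClimb_acc (pd : List (Int × Int × Int)) :
    ∀ (f : Nat) (m : Int) (pos : List (Int × Int)) (a : List Int),
      pvClimb pd f m pos a = ((pvClimb pd f m pos []).1, a ++ (pvClimb pd f m pos []).2) := by
  intro f
  induction f with
  | zero => intro m pos a; simp [pvClimb]
  | succ f ih =>
    intro m pos a
    by_cases hf : (pvFind pos m).isSome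
    · rw [pvClimb_succ, if_pos hf, pvClimb_succ, if_pos hf]
      simp
    · have hR : pvClimb pd (f+1) m pos [] =
          ((pvClimb pd f (pvPar pd m) pos []).1, [m] ++ (pvClimb pd f (pvPar pd m) pos []).2) := by
        rw [pvClimb_succ, if_neg hf]
        simpa using ih (pvPar pd m) pos [m]
      rw [pvClimb_succ, if_neg hf, ih (pvPar pd m) pos (a ++ [m]), hR]
      simp

theorem pvClimb_stab {pd : List (Int × Int × Int)} (H : pvClause pd) :
    ∀ (N : Nat) (x : Int) (pos : List (Int × Int)) (a : List Int) (f g : Nat),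
      x ∈ pvKeys pd → (∃ y ∈ x :: Tc pd x, (pvFind pos y).isSome) →
      nmes pd x < f → nmes pd x < g → nmes pd x ≤ N →
      pvClimb pd f x pos a = pvClimb pd g x pos a := by
  intro N
  induction N with
  | zero =>
    intro x pos a f g hx hhit hf hg _
    obtain ⟨f', rfl⟩ : ∃ f', f = f'+1 := ⟨f-1, by omega⟩
    obtain ⟨g', rfl⟩ : ∃ g', g = g'+1 := ⟨g-1, by omega⟩
    by_cases hfind : (pvFind pos x).isSome
    · rw [pvClimb_succ, if_pos hfind, pvClimb_succ, if_pos hfind]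
    · exfalso
      by_cases hp : pvPar pd x = x
      · obtain ⟨y, hy, hys⟩ := hhit
        rw [Tc_root hp] at hy
        rcases List.mem_cons.mp hy with rfl | hy
        · exact hfind hys
        · simp at hy
      · rcases pv_step H hx with h | ⟨hK, hD⟩
        · exact absurd h hp
        · have := nmes_lt hK hx hD; omega
  | succ N ih =>
    intro x pos a f g hx hhit hf hg hN
    obtain ⟨f', rfl⟩ : ∃ f', f = f'+1 := ⟨f-1, by omega⟩
    obtain ⟨g', rfl⟩ : ∃ g', g = g'+1 := ⟨g-1, by omega⟩
    by_cases hfind : (pvFind pos x).isSome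
    · rw [pvClimb_succ, if_pos hfind, pvClimb_succ, if_pos hfind]
    · by_cases hp : pvPar pd x = x
      · exfalso
        obtain ⟨y, hy, hys⟩ := hhit
        rw [Tc_root hp] at hy
        rcases List.mem_cons.mp hy with rfl | hy
        · exact hfind hys
        · simp at hy
      · rcases pv_step H hx with h | ⟨hK, hD⟩
        · exact absurd h hp
        · have hn := nmes_lt hK hx hD
          rw [pvClimb_succ, if_neg hfind, pvClimb_succ, if_neg hfind]
          refine ih (pvPar pd x) pos (a ++ [x]) f' g' hK ?_ (by omega) (by omega) (by omega)
          obtain ⟨y, hy, hys⟩ := hhit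
          rw [Tc_cons H hx hp] at hy
          rcases List.mem_cons.mp hy with rfl | hy
          · exact absurd hys hfind
          · exact ⟨y, hy, hys⟩

theorem pvClimb_congr {pd : List (Int × Int × Int)} (H : pvClause pd) :
    ∀ (f : Nat) (x : Int) (pos pos' : List (Int × Int)) (a : List Int),
      x ∈ pvKeys pd →
      (∀ y ∈ x :: Tc pd x, (pvFind pos y).isSome = (pvFind pos' y).isSome) →
      pvClimb pd f x pos a = pvClimb pd f x pos' a := by
  intro f
  induction f with
  | zero => intro x pos pos' a _ _; rfl
  | succ f ih =>
    intro x pos pos' a hx hag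
    have hx0 : (pvFind pos x).isSome = (pvFind pos' x).isSome := hag x List.mem_cons_self
    by_cases hfind : (pvFind pos x).isSome
    · rw [pvClimb_succ, if_pos hfind, pvClimb_succ, if_pos (hx0 ▸ hfind)]
    · rw [pvClimb_succ, if_neg hfind, pvClimb_succ, if_neg (hx0 ▸ hfind)]
      by_cases hp : pvPar pd x = x
      · rw [hp]
        exact ih x pos pos' (a ++ [x]) hx hag
      · rcases pv_step H hx with h | ⟨hK, _⟩
        · exact absurd h hp
        · refine ih (pvPar pd x) pos pos' (a ++ [x]) hK ?_
          intro y hy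
          exact hag y (by rw [Tc_cons H hx hp]; exact List.mem_cons_of_mem _ hy)

theorem pvClimb_spec {pd : List (Int × Int × Int)} (H : pvClause pd) :
    ∀ (N : Nat) (x : Int) (pos : List (Int × Int)) (f : Nat) (a : List Int),
      x ∈ pvKeys pd → (∃ y ∈ x :: Tc pd x, (pvFind pos y).isSome) →
      nmes pd x < f → nmes pd x ≤ N →
      ∃ m p2, pvClimb pd f x pos a = (m, a ++ p2) ∧ (pvFind pos m).isSome ∧ m ∈ x :: Tc pd x := by
  intro N
  induction N with
  | zero =>
    intro x pos f a hx hhit hf _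
    obtain ⟨f', rfl⟩ : ∃ f', f = f'+1 := ⟨f-1, by omega⟩
    by_cases hfind : (pvFind pos x).isSome
    · exact ⟨x, [], by rw [pvClimb_succ, if_pos hfind]; simp, hfind, List.mem_cons_self⟩
    · exfalso
      by_cases hp : pvPar pd x = x
      · obtain ⟨y, hy, hys⟩ := hhit
        rw [Tc_root hp] at hy
        rcases List.mem_cons.mp hy with rfl | hy
        · exact hfind hys
        · simp at hy
      · rcases pv_step H hx with h | ⟨hK, hD⟩
        · exact absurd h hp
        · have := nmes_lt hK hx hD; omega
  | succ N ih =>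
    intro x pos f a hx hhit hf hN
    obtain ⟨f', rfl⟩ : ∃ f', f = f'+1 := ⟨f-1, by omega⟩
    by_cases hfind : (pvFind pos x).isSome
    · exact ⟨x, [], by rw [pvClimb_succ, if_pos hfind]; simp, hfind, List.mem_cons_self⟩
    · by_cases hp : pvPar pd x = x
      · exfalso
        obtain ⟨y, hy, hys⟩ := hhit
        rw [Tc_root hp] at hy
        rcases List.mem_cons.mp hy with rfl | hy
        · exact hfind hys
        · simp at hy
      · rcases pv_step H hx with h | ⟨hK, hD⟩
        · exact absurd h hp
        · have hn := nmes_lt hK hx hD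
          have hhit' : ∃ y ∈ pvPar pd x :: Tc pd (pvPar pd x), (pvFind pos y).isSome := by
            obtain ⟨y, hy, hys⟩ := hhit
            rw [Tc_cons H hx hp] at hy
            rcases List.mem_cons.mp hy with rfl | hy
            · exact absurd hys hfind
            · exact ⟨y, hy, hys⟩
          obtain ⟨m, p2, heq, hm1, hm2⟩ := ih (pvPar pd x) pos f' (a ++ [x]) hK hhit' (by omega) (by omega)
          refine ⟨m, x :: p2, ?_, hm1, ?_⟩
          · rw [pvClimb_succ, if_neg hfind, heq]
            simp
          · rw [Tc_cons H hx hp]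
            exact List.mem_cons_of_mem _ hm2

-- ---- A's loop = pure combinator ----
theorem pvLoopA_eq_core (pd : List (Int × Int × Int)) :
    ∀ (f : Nat) (a b : Int) (q1 q2 : List Int),
      pvLoopA pd f a b (q1 ++ [a]) (q2 ++ [b]) = q1 ++ pvCore pd f a b ++ q2.reverse := by
  intro f
  induction f with
  | zero => intro a b q1 q2; simp [pvLoopA, pvCore]
  | succ f ih =>
    intro a b q1 q2
    rw [pvLoopA_succ, pvCore_succ]
    by_cases hab : a = b
    · subst hab
      simp
    · rw [if_neg hab, if_neg hab]
      by_cases hd : pvDep pd a < pvDep pd b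
      · rw [if_pos hd, if_pos hd]
        have := ih a (pvPar pd b) q1 (q2 ++ [b])
        rw [this]
        simp
      · rw [if_neg hd, if_neg hd]
        have := ih (pvPar pd a) b (q1 ++ [a]) q2
        rw [this]
        simp

-- ---- the diagonal and the two R-step equations ----
theorem mu_pos {pd : List (Int × Int × Int)} (H : pvClause pd)
    (Hc : pd.countP (fun e => e.2.1 == e.1) = 1) {a b : Int}
    (ha : a ∈ pvKeys pd) (hb : b ∈ pvKeys pd) (hab : a ≠ b) : 0 < pvMu pd a b := by
  rcases pv_step H ha with hpa | ⟨hKa, hDa⟩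
  · rcases pv_step H hb with hpb | ⟨hKb, hDb⟩
    · exact absurd (pv_uniq Hc ha hb hpa hpb) hab
    · have h1 := pv_dmin_le_dep hKb
      have h2 := pv_dmin_le_dep ha
      unfold pvMu; omega
  · have h1 := pv_dmin_le_dep hKa
    have h2 := pv_dmin_le_dep hb
    unfold pvMu; omega

theorem core_R_diag {pd : List (Int × Int × Int)} {a : Int} {f : Nat} (hf : 0 < f) :
    pvCore pd f a a = pvR pd a a := by
  obtain ⟨f', rfl⟩ : ∃ f', f = f'+1 := ⟨f-1, by omega⟩
  rw [pvCore_succ, if_pos rfl]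
  have hfind : pvFind (tagFrom (a :: Tc pd a) 0) a = some 0 := by
    rw [pvFind_tag]
    simp
  unfold pvR
  rw [pv_fuelB_eq, pvClimb_succ, if_pos (by rw [hfind]; rfl)]
  simp [hfind]

theorem R_right {pd : List (Int × Int × Int)} (H : pvClause pd)
    (Hc : pd.countP (fun e => e.2.1 == e.1) = 1) {a b : Int}
    (ha : a ∈ pvKeys pd) (hb : b ∈ pvKeys pd)
    (hK : pvPar pd b ∈ pvKeys pd) (hD : pvDep pd (pvPar pd b) < pvDep pd b)
    (hd : pvDep pd a < pvDep pd b) :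
    pvR pd a b = pvR pd a (pvPar pd b) ++ [b] := by
  have hbnot : b ∉ a :: Tc pd a := by
    intro hmem
    rcases List.mem_cons.mp hmem with rfl | h
    · exact lt_irrefl _ hd
    · have := (tch_mem H _ a ha b h).2; omega
  have hfnone : ¬ (pvFind (tagFrom (a :: Tc pd a) 0) b).isSome := by
    rw [pvFind_tag, if_neg hbnot]; simp
  obtain ⟨ra, hra, hpra, hrka⟩ := Tc_last H (nmes pd a) a ha le_rfl
  have hfra : (pvFind (tagFrom (a :: Tc pd a) 0) ra).isSome := by
    rw [pvFind_tag, if_pos hra]; simp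
  obtain ⟨rb, hrb, hprb, hrkb⟩ := Tc_last H (nmes pd (pvPar pd b)) (pvPar pd b) hK le_rfl
  have hreq : rb = ra := pv_uniq Hc hrkb hrka hprb hpra
  subst hreq
  have h1 : pvClimb pd (pvFuelB pd b) b (tagFrom (a :: Tc pd a) 0) [] =
      pvClimb pd (nmes pd b) (pvPar pd b) (tagFrom (a :: Tc pd a) 0) [b] := by
    rw [pv_fuelB_eq, pvClimb_succ, if_neg hfnone]
    simp
  have hstab : pvClimb pd (nmes pd b) (pvPar pd b) (tagFrom (a :: Tc pd a) 0) [b] =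
      pvClimb pd (pvFuelB pd (pvPar pd b)) (pvPar pd b) (tagFrom (a :: Tc pd a) 0) [b] :=
    pvClimb_stab H (nmes pd (pvPar pd b)) (pvPar pd b) _ [b] (nmes pd b) (pvFuelB pd (pvPar pd b))
      hK ⟨rb, hrb, hfra⟩ (nmes_lt hK hb hD) (by rw [pv_fuelB_eq]; omega) le_rfl
  unfold pvR
  rw [h1, hstab, pvClimb_acc pd (pvFuelB pd (pvPar pd b)) (pvPar pd b) (tagFrom (a :: Tc pd a) 0) [b]]
  simp

theorem R_left {pd : List (Int × Int × Int)} (H : pvClause pd)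
    (Hc : pd.countP (fun e => e.2.1 == e.1) = 1) {a b : Int}
    (ha : a ∈ pvKeys pd) (hb : b ∈ pvKeys pd)
    (hK : pvPar pd a ∈ pvKeys pd) (hD : pvDep pd (pvPar pd a) < pvDep pd a)
    (hab : a ≠ b) (hd : ¬ pvDep pd a < pvDep pd b) :
    pvR pd a b = a :: pvR pd (pvPar pd a) b := by
  have hpa : pvPar pd a ≠ a := by
    intro h
    rw [h] at hD
    exact lt_irrefl _ hD
  have hTa : Tc pd a = pvPar pd a :: Tc pd (pvPar pd a) := Tc_cons H ha hpa
  have hanot : a ∉ b :: Tc pd b := by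
    intro hmem
    rcases List.mem_cons.mp hmem with h | h
    · exact hab h
    · exact hd (tch_mem H _ b hb a h).2
  obtain ⟨r, hrb, hpr, hrk⟩ := Tc_last H (nmes pd b) b hb le_rfl
  obtain ⟨r2, hr2, hpr2, hrk2⟩ := Tc_last H (nmes pd (pvPar pd a)) (pvPar pd a) hK le_rfl
  have hreq : r = r2 := pv_uniq Hc hrk hrk2 hpr hpr2
  subst hreq
  have hfr : (pvFind (tagFrom (pvPar pd a :: Tc pd (pvPar pd a)) 0) r).isSome := by
    rw [pvFind_tag, if_pos hr2]; simp
  obtain ⟨m, p2, heq, hmf, hmc⟩ := pvClimb_spec H (nmes pd b) b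
      (tagFrom (pvPar pd a :: Tc pd (pvPar pd a)) 0) (pvFuelB pd b) [] hb ⟨r, hrb, hfr⟩
      (by rw [pv_fuelB_eq]; omega) le_rfl
  have hmPa : m ∈ pvPar pd a :: Tc pd (pvPar pd a) := by
    by_contra h
    rw [pvFind_tag, if_neg h] at hmf
    simp at hmf
  have hma : m ≠ a := by
    intro hmeq
    rw [← hTa, hmeq] at hmPa
    exact lt_irrefl _ (tch_mem H _ a ha a hmPa).2
  have hcong : pvClimb pd (pvFuelB pd b) b (tagFrom (a :: Tc pd a) 0) [] =
      pvClimb pd (pvFuelB pd b) b (tagFrom (pvPar pd a :: Tc pd (pvPar pd a)) 0) [] := by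
    refine pvClimb_congr H (pvFuelB pd b) b _ _ [] hb ?_
    intro y hy
    have hya : y ≠ a := fun h => hanot (h ▸ hy)
    rw [pvFind_tag, pvFind_tag, hTa]
    by_cases hym : y ∈ pvPar pd a :: Tc pd (pvPar pd a)
    · rw [if_pos (List.mem_cons_of_mem _ hym), if_pos hym]
      rfl
    · rw [if_neg (by simp [hym, hya]), if_neg hym]
  have hidxA : pvFind (tagFrom (a :: (pvPar pd a :: Tc pd (pvPar pd a))) 0) m =
      some (((pvPar pd a :: Tc pd (pvPar pd a)).idxOf m + 1 : Nat) : Int) := by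
    rw [pvFind_tag, if_pos (List.mem_cons_of_mem _ hmPa)]
    rw [List.idxOf_cons_ne _ (Ne.symm hma)]
    simp
  have hidxPa : pvFind (tagFrom (pvPar pd a :: Tc pd (pvPar pd a)) 0) m =
      some (((pvPar pd a :: Tc pd (pvPar pd a)).idxOf m : Nat) : Int) := by
    rw [pvFind_tag, if_pos hmPa]
    simp
  simp only [List.nil_append] at heq
  rw [hTa] at hcong
  unfold pvR
  rw [hTa, hcong, heq, hidxA, hidxPa]
  simp [List.take_succ_cons]

theorem main_core_eq_R {pd : List (Int × Int × Int)} (H : pvClause pd)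
    (Hc : pd.countP (fun e => e.2.1 == e.1) = 1) :
    ∀ (N : Nat) (a b : Int) (f : Nat), a ∈ pvKeys pd → b ∈ pvKeys pd →
      pvMu pd a b < f → pvMu pd a b ≤ N → pvCore pd f a b = pvR pd a b := by
  intro N
  induction N with
  | zero =>
    intro a b f ha hb hf hN
    by_cases hab : a = b
    · subst hab; exact core_R_diag (by omega)
    · exact absurd hN (by have := mu_pos H Hc ha hb hab; omega)
  | succ N ih =>
    intro a b f ha hb hf hN
    by_cases hab : a = b
    · subst hab; exact core_R_diag (by omega)
    · obtain ⟨f', rfl⟩ : ∃ f', f = f'+1 := ⟨f-1, by omega⟩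
      rw [pvCore_succ, if_neg hab]
      by_cases hd : pvDep pd a < pvDep pd b
      · rw [if_pos hd]
        have hbroot : pvPar pd b ≠ b := by
          intro hp
          obtain ⟨r, hr, hpr, hrk⟩ := Tc_last H (nmes pd a) a ha le_rfl
          have hreq : r = b := pv_uniq Hc hrk hb hpr hp
          subst hreq
          rcases List.mem_cons.mp hr with rfl | hr2
          · exact lt_irrefl _ hd
          · have := (tch_mem H _ a ha r hr2).2
            omega
        rcases pv_step H hb with h | ⟨hK, hD⟩
        · exact absurd h hbroot
        · have h1 := pv_dmin_le_dep ha
          have h2 := pv_dmin_le_dep hK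
          have hmu : pvMu pd a (pvPar pd b) < pvMu pd a b := by unfold pvMu; omega
          rw [ih a (pvPar pd b) f' ha hK (by omega) (by omega)]
          exact (R_right H Hc ha hb hK hD hd).symm
      · rw [if_neg hd]
        have haroot : pvPar pd a ≠ a := by
          intro hp
          obtain ⟨r, hr, hpr, hrk⟩ := Tc_last H (nmes pd b) b hb le_rfl
          have hreq : r = a := pv_uniq Hc hrk ha hpr hp
          subst hreq
          rcases List.mem_cons.mp hr with h | hr2
          · exact hab h
          · exact hd (tch_mem H _ b hb r hr2).2
        rcases pv_step H ha with h | ⟨hK, hD⟩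
        · exact absurd h haroot
        · have h1 := pv_dmin_le_dep hb
          have h2 := pv_dmin_le_dep hK
          have hmu : pvMu pd (pvPar pd a) b < pvMu pd a b := by unfold pvMu; omega
          rw [ih (pvPar pd a) b f' hK hb (by omega) (by omega)]
          exact (R_left H Hc ha hb hK hD hab hd).symm

theorem alt_eq_R {pd : List (Int × Int × Int)} (H : pvClause pd) {a b : Int}
    (ha : a ∈ pvKeys pd) (hab : a ≠ b) :
    get_path_to_lca_alt a b pd = pvR pd a b := by
  rw [show get_path_to_lca_alt a b pd =
      (pvBuild pd (pvFuelB pd a) a [a] [(a, 0)]).1.take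
        (((pvFind (pvBuild pd (pvFuelB pd a) a [a] [(a, 0)]).2
            (pvClimb pd (pvFuelB pd b) b (pvBuild pd (pvFuelB pd a) a [a] [(a, 0)]).2 []).1).getD 0).toNat + 1)
        ++ (pvClimb pd (pvFuelB pd b) b (pvBuild pd (pvFuelB pd a) a [a] [(a, 0)]).2 []).2.reverse from by
    simp [get_path_to_lca_alt, hab]]
  rw [pvBuild_eq pd (pvFuelB pd a) a [a] [(a, 0)]]
  rw [tch_eq_Tc H (pvFuelB pd a) a ha (by rw [pv_fuelB_eq]; omega)]
  have htag : [((a : Int), (0 : Int))] ++ tagFrom (Tc pd a) [(a : Int)].length = tagFrom (a :: Tc pd a) 0 := by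
    simp [tagFrom]
  rw [show ([a] ++ Tc pd a : List Int) = a :: Tc pd a from rfl]
  rw [htag]
  rfl


-- ===== VERDICT (by name: the statement is the Claim_ definition above) =====
theorem get_path_to_lca_spec : Claim_equal_get_path_to_lca := by
  intro n1 n2 pd _hdom hpre
  unfold Spec_get_path_to_lca get_path_to_lca
  have hA : pvLoopA pd (pvFuelA pd n1 n2) n1 n2 [n1] [n2] = pvCore pd (pvFuelA pd n1 n2) n1 n2 := by
    simpa using pvLoopA_eq_core pd (pvFuelA pd n1 n2) n1 n2 [] []
  rw [hA]
  by_cases hab : n1 = n2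
  · subst hab
    rw [pv_fuelA_eq, pvCore_succ, if_pos rfl]
    simp [get_path_to_lca_alt]
  · rcases hpre with h | ⟨_hnd, h1, h2, Hcl, Hct⟩
    · exact absurd h hab
    · rw [main_core_eq_R Hcl Hct (pvMu pd n1 n2) n1 n2 (pvFuelA pd n1 n2) h1 h2
          (by rw [pv_fuelA_eq]; omega) le_rfl]
      exact (alt_eq_R Hcl h1 hab).symm
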